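-- pv_equiv track=rewrite | github.com/HiNala/code_editor | backend/app/services/test_driven_agent.py | _parse_files_from_response
-- ===== SOURCE A (Python) =====
-- from typing import Any, AsyncGenerator, Dict, List
--
-- def _parse_files_from_response(response: str) -> Dict[str, str]:
--     """Parse files from AI response with code blocks"""
--     files = {}
--     current_file = None
--     current_content = []
--
--     lines = response.split('\n')
--     in_code_block = False
--
--     for line in lines:
--         if line.startswith('```') and not in_code_block:
--             # Start of code block
--             filename = line[3:].strip()
--             if filename:
--                 current_file = filename
--                 current_content = []
--                 in_code_block = True
--         elif line.startswith('```') and in_code_block: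
--             # End of code block
--             if current_file:
--                 files[current_file] = '\n'.join(current_content)
--             current_file = None
--             current_content = []
--             in_code_block = False
--         elif in_code_block:
--             current_content.append(line)
--
--     return files
-- ===== SOURCE B (Python) =====
-- def _parse_files_from_response(response: str):
--     """Parse files from AI response with code blocks (block-seeking scanner)."""
--     files = {}
--     lines = response.split('\n')
--     n = len(lines)
--     i = 0
--     while i < n:
--         line = lines[i]
--         name = line[3:].strip() if line.startswith('```') else ''
--         if name:
--             j = i + 1
--             while j < n and not lines[j].startswith('```'):
--                 j += 1
--             if j < n:
--                 files[name] = '\n'.join(lines[i + 1:j])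
--             i = j + 1
--         else:
--             i += 1
--     return files
-- ===== Notes on version B (the rewrite author's own statement) =====
-- stated objective: alternative
-- what changed: Replaced the per-line in_code_block state machine by a block-seeking scanner: an outer loop that jumps from opening fence to opening fence and, for each valid opener, an inner scan that locates the closing fence and slices out the body lines in one step.
import Mathlib
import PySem

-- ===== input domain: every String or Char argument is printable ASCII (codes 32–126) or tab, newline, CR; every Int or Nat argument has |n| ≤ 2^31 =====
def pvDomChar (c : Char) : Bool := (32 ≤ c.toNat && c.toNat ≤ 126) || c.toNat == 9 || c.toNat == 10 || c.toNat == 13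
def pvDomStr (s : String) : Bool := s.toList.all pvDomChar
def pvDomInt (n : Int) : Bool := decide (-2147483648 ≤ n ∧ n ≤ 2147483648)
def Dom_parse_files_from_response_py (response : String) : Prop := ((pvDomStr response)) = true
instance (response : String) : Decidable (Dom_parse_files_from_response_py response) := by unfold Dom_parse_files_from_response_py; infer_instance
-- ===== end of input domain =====

-- B replaces A's per-line in_code_block state machine by a block-seeking scanner (same cost, different structure).

-- ===== PORT A =====
-- one iteration of A's for-loop; state = (files, current_file, current_content, in_code_block)
def pvAStep (st : PySem.Dict String String × Option String × List String × Bool) (line : String) :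
    PySem.Dict String String × Option String × List String × Bool :=
  let (files, cf, cc, icb) := st
  if PySem.Str.startswith line "```" && !icb then
    let filename := PySem.Str.strip (PySem.Str.slice line (some 3) none)
    if filename ≠ "" then (files, some filename, ([] : List String), true) else (files, cf, cc, icb)
  else if PySem.Str.startswith line "```" && icb then
    ((match cf with
      | some f => files.insert f (PySem.Str.join "\n" cc)
      | none => files), none, ([] : List String), false)
  else if icb then (files, cf, cc ++ [line], icb)
  else (files, cf, cc, icb)

-- split('\n') has a nonempty separator, so PySem.Str.split? is never none here; .getD [] only discharges the Option
def parse_files_from_response_py (response : String) : List (String × String) :=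
  (((PySem.Str.split? response "\n").getD []).foldl pvAStep (PySem.Dict.empty, none, [], false)).1.items

-- ===== PORT B =====
-- B's inner while loop: (lines[i+1:j], some lines[j+1:]) for the first fence line j, or none if no fence follows
def pvSplitAtFence : List String → List String × Option (List String)
  | [] => ([], none)
  | l :: rest =>
    if PySem.Str.startswith l "```" then ([], some rest)
    else
      let (b, r) := pvSplitAtFence rest
      (l :: b, r)

-- termination measure for pvScanB (the port cites it in decreasing_by)
theorem pvSplitAtFence_len : ∀ (xs b r : List String), pvSplitAtFence xs = (b, some r) → r.length < xs.length := by
  intro xs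
  induction xs with
  | nil => intro b r h; simp [pvSplitAtFence] at h
  | cons l rest ih =>
    intro b r h
    rw [pvSplitAtFence] at h
    by_cases hf : PySem.Str.startswith l "```" = true
    · rw [if_pos hf] at h
      cases h; simp
    · rw [if_neg hf] at h
      rcases hsp : pvSplitAtFence rest with ⟨b', r'⟩
      rw [hsp] at h
      cases h
      have := ih b' r hsp
      simp; omega

-- B's outer while loop: jump from opening fence to opening fence
def pvScanB (files : PySem.Dict String String) (lines : List String) : PySem.Dict String String :=
  match lines with
  | [] => files
  | l :: rest =>
    let name := if PySem.Str.startswith l "```" then PySem.Str.strip (PySem.Str.slice l (some 3) none) else ""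
    if name ≠ "" then
      match h : pvSplitAtFence rest with
      | (body, some rest') => pvScanB (files.insert name (PySem.Str.join "\n" body)) rest'
      | (_, none) => files
    else pvScanB files rest
termination_by lines.length
decreasing_by
  · have := pvSplitAtFence_len rest _ _ h; simp; omega
  · simp

def parse_files_from_response_py_alt (response : String) : List (String × String) :=
  (pvScanB PySem.Dict.empty ((PySem.Str.split? response "\n").getD [])).items

-- ===== PRECONDITION & SPEC =====
def Spec_parse_files_from_response_py (response : String) (out : List (String × String)) : Prop := out = parse_files_from_response_py_alt response
instance (response : String) (out : List (String × String)) : Decidable (Spec_parse_files_from_response_py response out) := by unfold Spec_parse_files_from_response_py; infer_instance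

-- ===== CLAIM (what is proved, stated in full; the proofs are below) =====
def Claim_equal_parse_files_from_response_py : Prop := ∀ (response : String), Dom_parse_files_from_response_py response → Spec_parse_files_from_response_py response (parse_files_from_response_py response)

-- ===== LEMMAS AND PROOFS =====

-- The simultaneous loop invariant: outside a block A's fold is B's scanner; inside a block with
-- current file f and accumulated lines acc, A's fold closes at the next fence exactly as B slices.
theorem pvMainInv : ∀ (lines : List String) (files : PySem.Dict String String),
    ((lines.foldl pvAStep (files, none, [], false)).1 = pvScanB files lines) ∧
    (∀ (f : String) (acc : List String),
      (lines.foldl pvAStep (files, some f, acc, true)).1 =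
        match pvSplitAtFence lines with
        | (body, some rest') => pvScanB (files.insert f (PySem.Str.join "\n" (acc ++ body))) rest'
        | (_, none) => files) := by
  intro lines
  induction lines with
  | nil =>
    intro files
    refine ⟨by simp [pvScanB], ?_⟩
    intro f acc; simp [pvSplitAtFence]
  | cons l rest ih =>
    intro files
    constructor
    · rw [List.foldl_cons, pvScanB]
      by_cases hf : PySem.Chars.startswith l.toList ['`','`','`'] = true
      · by_cases hn : PySem.Str.strip (PySem.Str.slice l (some 3) none) = ""
        · have : pvAStep (files, none, [], false) l = (files, none, [], false) := by simp [pvAStep, hf, hn]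
          rw [this]
          simp only [PySem.Str.startswith_eq]
          simp [hf, hn, (ih files).1]
        · have : pvAStep (files, none, [], false) l =
              (files, some (PySem.Str.strip (PySem.Str.slice l (some 3) none)), [], true) := by
            simp [pvAStep, hf, hn]
          rw [this]
          have h2 := (ih files).2 (PySem.Str.strip (PySem.Str.slice l (some 3) none)) []
          rw [h2]
          simp only [PySem.Str.startswith_eq, show ("```".toList) = ['`','`','`'] from rfl]
          simp only [hf, if_true, List.nil_append]
          rw [if_pos hn]
          rcases hsp : pvSplitAtFence rest with ⟨body, r⟩
          cases r <;> simp_all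
      · have : pvAStep (files, none, [], false) l = (files, none, [], false) := by simp [pvAStep, hf]
        rw [this]
        simp only [PySem.Str.startswith_eq]
        simp [hf, (ih files).1]
    · intro f acc
      rw [List.foldl_cons, pvSplitAtFence]
      by_cases hf : PySem.Chars.startswith l.toList ['`','`','`'] = true
      · have : pvAStep (files, some f, acc, true) l = (files.insert f (PySem.Str.join "\n" acc), none, [], false) := by
          simp [pvAStep, hf]
        rw [this]
        simp only [PySem.Str.startswith_eq]
        simp [hf, (ih (files.insert f (PySem.Str.join "\n" acc))).1]
      · have : pvAStep (files, some f, acc, true) l = (files, some f, acc ++ [l], true) := by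
          simp [pvAStep, hf]
        rw [this, (ih files).2 f (acc ++ [l])]
        simp only [PySem.Str.startswith_eq, show ("```".toList) = ['`','`','`'] from rfl]
        rw [if_neg hf]
        rcases hsp : pvSplitAtFence rest with ⟨body, r⟩
        cases r <;> simp [List.append_assoc]

-- ===== VERDICT (by name: the statement is the Claim_ definition above) =====
theorem parse_files_from_response_py_spec : Claim_equal_parse_files_from_response_py := by
  intro response _
  unfold Spec_parse_files_from_response_py parse_files_from_response_py parse_files_from_response_py_alt
  rw [(pvMainInv ((PySem.Str.split? response "\n").getD []) PySem.Dict.empty).1]
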